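-- pv_equiv track=rewrite | github.com/Bright-L01/simpulse | src/simpulse/optimization/priority_optimizer.py | generate_priority_commands
-- ===== SOURCE A (Python) =====
-- from typing import Dict, List, Tuple
--
-- def generate_priority_commands(
--     lemmas: List[Tuple[str, str]], base_priority: int = 1200
-- ) -> List[str]:
--     """Generate Lean 4 attribute commands to set priorities.
--
--     Args:
--         lemmas: List of (lemma_name, description) tuples
--         base_priority: Starting priority for top lemma
--
--     Returns:
--         List of attribute commands
--     """
--     commands = []
--
--     for i, (lemma_name, desc) in enumerate(lemmas):
--         # Use logarithmic decay for priorities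
--         if i == 0:
--             priority = base_priority
--         elif i < 2:
--             priority = base_priority - 1
--         elif i < 4:
--             priority = base_priority - 2
--         elif i < 8:
--             priority = base_priority - 3
--         else:
--             priority = base_priority - 4
--
--         # Generate attribute command
--         cmd = f"attribute [simp {priority}] {lemma_name}"
--         commands.append(f"-- {desc}")
--         commands.append(cmd)
--         commands.append("")
--
--     return commands
-- ===== SOURCE B (Python) =====
-- def generate_priority_commands(lemmas, base_priority=1200):
--     """Block decomposition: the logarithmic decay partitions the list into
--     chunks of sizes 1, 1, 2, 4 and a remainder, each chunk sharing one
--     constant priority base_priority - k; no per-index priority is computed."""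
--     out = []
--     rest = lemmas
--     for k, size in enumerate([1, 1, 2, 4]):
--         for name, desc in rest[:size]:
--             out.extend((f"-- {desc}", f"attribute [simp {base_priority - k}] {name}", ""))
--         rest = rest[size:]
--     for name, desc in rest:
--         out.extend((f"-- {desc}", f"attribute [simp {base_priority - 4}] {name}", ""))
--     return out
-- ===== Notes on version B (the rewrite author's own statement) =====
-- stated objective: alternative
-- what changed: Replaces the per-index enumerate loop with its five-way priority ladder by a block decomposition: the list is split into chunks of sizes 1,1,2,4 and a remainder, and each chunk is emitted with one constant priority base_priority - k.
import Mathlib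
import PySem

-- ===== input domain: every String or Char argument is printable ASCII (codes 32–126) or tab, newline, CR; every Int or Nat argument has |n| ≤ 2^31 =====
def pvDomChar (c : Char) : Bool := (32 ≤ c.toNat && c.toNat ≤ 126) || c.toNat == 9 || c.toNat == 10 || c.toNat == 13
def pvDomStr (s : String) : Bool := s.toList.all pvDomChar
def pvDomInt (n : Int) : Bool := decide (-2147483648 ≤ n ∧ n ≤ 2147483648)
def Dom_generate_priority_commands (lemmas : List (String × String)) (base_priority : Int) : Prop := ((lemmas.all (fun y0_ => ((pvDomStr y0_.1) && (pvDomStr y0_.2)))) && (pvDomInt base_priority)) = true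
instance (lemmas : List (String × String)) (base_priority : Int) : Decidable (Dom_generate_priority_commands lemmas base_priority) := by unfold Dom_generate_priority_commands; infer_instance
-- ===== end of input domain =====

-- B replaces A's per-index enumerate loop with its five-way priority ladder by a block
-- decomposition: chunks of sizes 1,1,2,4 and a remainder, each emitted with one constant
-- priority base_priority - k (objective: alternative, same cost).

-- ===== PORT A =====
def generate_priority_commands (lemmas : List (String × String)) (base_priority : Int) : List String :=
  (PySem.List.enumerate lemmas).foldl (fun commands p =>
    let i := p.1
    let lemma_name := p.2.1
    let desc := p.2.2
    let priority : Int :=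
      if i = 0 then base_priority
      else if i < 2 then base_priority - 1
      else if i < 4 then base_priority - 2
      else if i < 8 then base_priority - 3
      else base_priority - 4
    let cmd := "attribute [simp " ++ PySem.Int.toStr priority ++ "] " ++ lemma_name
    commands ++ ["-- " ++ desc, cmd, ""]) []

-- ===== PORT B =====
def generate_priority_commands_alt (lemmas : List (String × String)) (base_priority : Int) : List String :=
  let st := (PySem.List.enumerate [(1 : Int), 1, 2, 4]).foldl
    (fun (st : List String × List (String × String)) (ks : Int × Int) =>
      (st.1 ++ (st.2.take ks.2.toNat).flatMap (fun q =>
          ["-- " ++ q.2,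
           "attribute [simp " ++ PySem.Int.toStr (base_priority - ks.1) ++ "] " ++ q.1, ""]),
       st.2.drop ks.2.toNat))
    ([], lemmas)
  st.1 ++ st.2.flatMap (fun q =>
      ["-- " ++ q.2,
       "attribute [simp " ++ PySem.Int.toStr (base_priority - 4) ++ "] " ++ q.1, ""])

-- ===== PRECONDITION & SPEC =====
def Spec_generate_priority_commands (lemmas : List (String × String)) (base_priority : Int) (out : List String) : Prop := out = generate_priority_commands_alt lemmas base_priority
instance (lemmas : List (String × String)) (base_priority : Int) (out : List String) : Decidable (Spec_generate_priority_commands lemmas base_priority out) := by unfold Spec_generate_priority_commands; infer_instance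

-- ===== CLAIM =====
def Claim_equal_generate_priority_commands : Prop := ∀ (lemmas : List (String × String)) (base_priority : Int), Dom_generate_priority_commands lemmas base_priority → Spec_generate_priority_commands lemmas base_priority (generate_priority_commands lemmas base_priority)

-- ===== LEMMAS AND PROOFS =====

-- shorthand for the three output lines of one lemma at priority pr
def pvTrip (pr : Int) (q : String × String) : List String :=
  ["-- " ++ q.2, "attribute [simp " ++ PySem.Int.toStr pr ++ "] " ++ q.1, ""]

-- A's priority ladder
def pvLadder (base i : Int) : Int :=
  if i = 0 then base
  else if i < 2 then base - 1
  else if i < 4 then base - 2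
  else if i < 8 then base - 3
  else base - 4

theorem pvToNat1 : (1 : Int).toNat = 1 := rfl
theorem pvToNat2 : (2 : Int).toNat = 2 := rfl
theorem pvToNat4 : (4 : Int).toNat = 4 := rfl

-- A's loop as a flatMap over enumerate
theorem A_eq_flatMap (lemmas : List (String × String)) (base : Int) :
    generate_priority_commands lemmas base
      = (PySem.List.enumerate lemmas).flatMap (fun p => pvTrip (pvLadder base p.1) p.2) := by
  unfold generate_priority_commands
  rw [PySem.List.foldl_append_eq_flatMap]
  rfl

-- a segment on which the ladder is constant flattens to a constant-priority block
theorem seg_const (base v : Int) (l : List (String × String)) (s : Int)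
    (h : ∀ i : Int, s ≤ i → i < s + l.length → pvLadder base i = v) :
    (PySem.List.enumerate l s).flatMap (fun p => pvTrip (pvLadder base p.1) p.2)
      = l.flatMap (fun q => pvTrip v q) := by
  induction l generalizing s with
  | nil => simp [PySem.List.enumerate_nil]
  | cons hd tl ih =>
    rw [PySem.List.enumerate_cons]
    simp only [List.flatMap_cons]
    have hlen : s < s + ((hd :: tl).length : Int) := by simp only [List.length_cons]; push_cast; omega
    rw [h s le_rfl hlen,
        ih (s + 1) (fun i h1 h2 => h i (by omega)
          (by simp only [List.length_cons]; push_cast at h2 ⊢; omega))]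

theorem enum_split (l : List (String × String)) (s : Int) (m : Nat)
    (f : Int × (String × String) → List String) :
    (PySem.List.enumerate l s).flatMap f
      = (PySem.List.enumerate (l.take m) s).flatMap f
        ++ (PySem.List.enumerate (l.drop m) (s + (l.take m).length)).flatMap f := by
  conv_lhs => rw [← List.take_append_drop m l]
  rw [PySem.List.enumerate_append, List.flatMap_append]

-- ===== VERDICT =====
theorem generate_priority_commands_spec : Claim_equal_generate_priority_commands := by
  intro lemmas base _
  unfold Spec_generate_priority_commands
  rw [A_eq_flatMap]
  unfold generate_priority_commands_alt
  simp only [PySem.List.enumerate_cons, PySem.List.enumerate_nil, List.foldl_cons, List.foldl_nil,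
    pvToNat1, pvToNat2, pvToNat4]
  rw [enum_split lemmas 0 1, enum_split (lemmas.drop 1) _ 1, enum_split ((lemmas.drop 1).drop 1) _ 2,
      enum_split (((lemmas.drop 1).drop 1).drop 2) _ 4]
  have l1 : (lemmas.take 1).length = min 1 lemmas.length := List.length_take
  have l2 : ((lemmas.drop 1).take 1).length = min 1 (lemmas.length - 1) := by
    rw [List.length_take, List.length_drop]
  have l3 : (((lemmas.drop 1).drop 1).take 2).length = min 2 (lemmas.length - 1 - 1) := by
    rw [List.length_take, List.length_drop, List.length_drop]
  have l5 : ((((lemmas.drop 1).drop 1).drop 2).drop 4).length = lemmas.length - 1 - 1 - 2 - 4 := by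
    simp [List.length_drop]; omega
  have l4 : ((((lemmas.drop 1).drop 1).drop 2).take 4).length = min 4 (lemmas.length - 1 - 1 - 2) := by
    rw [List.length_take, List.length_drop, List.length_drop, List.length_drop]
  rw [seg_const base (base - 0) (lemmas.take 1) 0
        (by intro i h1 h2; rw [l1] at h2; unfold pvLadder
            split_ifs <;> push_cast at h2 <;> omega),
      seg_const base (base - 1) ((lemmas.drop 1).take 1) _
        (by intro i h1 h2; rw [l1] at h1 h2; rw [l2] at h2; unfold pvLadder
            split_ifs <;> push_cast at h1 h2 <;> omega),
      seg_const base (base - 2) (((lemmas.drop 1).drop 1).take 2) _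
        (by intro i h1 h2; rw [l1] at h1 h2; rw [l2] at h1 h2; rw [l3] at h2; unfold pvLadder
            split_ifs <;> push_cast at h1 h2 <;> omega),
      seg_const base (base - 3) ((((lemmas.drop 1).drop 1).drop 2).take 4) _
        (by intro i h1 h2; rw [l1] at h1 h2; rw [l2] at h1 h2; rw [l3] at h1 h2; rw [l4] at h2
            unfold pvLadder; split_ifs <;> push_cast at h1 h2 <;> omega),
      seg_const base (base - 4) ((((lemmas.drop 1).drop 1).drop 2).drop 4) _
        (by intro i h1 h2; rw [l1] at h1 h2; rw [l2] at h1 h2; rw [l3] at h1 h2; rw [l4] at h1 h2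
            rw [l5] at h2; unfold pvLadder; split_ifs <;> push_cast at h1 h2 <;> omega)]
  simp [pvTrip]
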